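-- pv_equiv track=rewrite | github.com/thanasissot/myPyFuncs | closestNumbers.py | closestNumber
-- ===== SOURCE A (Python) =====
-- def closestNumber(a, b):
--     """Return the number closes to a that is divisible by M, if there
--     are more than one it returns the maximum absolute value
--     """
--     if a % b == 0:
--         return a
--     if b < 0:
--         b *= -1
--     for x in range(1, b + 1):
--         if a < 0:
--             x *= - 1
--         if (a + x) % b == 0:
--             return a + x
--         elif (a - x) % b == 0:
--             return a - x
-- ===== SOURCE B (Python) =====
-- def closestNumber(a, b):
--     m = abs(b)
--     r = a % m
--     if r == 0:
--         return a
--     if 2 * r < m or (2 * r == m and a < 0):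
--         return a - r
--     return a + (m - r)
-- ===== Notes on version B (the rewrite author's own statement) =====
-- stated objective: faster
-- what changed: A linearly scans offsets x=1..|b| testing divisibility of a+x and a-x; B computes the remainder r = a mod |b| once and picks a-r or a+(|b|-r) by closed-form arithmetic (tie broken toward larger absolute value), removing the loop entirely.
import Mathlib
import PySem

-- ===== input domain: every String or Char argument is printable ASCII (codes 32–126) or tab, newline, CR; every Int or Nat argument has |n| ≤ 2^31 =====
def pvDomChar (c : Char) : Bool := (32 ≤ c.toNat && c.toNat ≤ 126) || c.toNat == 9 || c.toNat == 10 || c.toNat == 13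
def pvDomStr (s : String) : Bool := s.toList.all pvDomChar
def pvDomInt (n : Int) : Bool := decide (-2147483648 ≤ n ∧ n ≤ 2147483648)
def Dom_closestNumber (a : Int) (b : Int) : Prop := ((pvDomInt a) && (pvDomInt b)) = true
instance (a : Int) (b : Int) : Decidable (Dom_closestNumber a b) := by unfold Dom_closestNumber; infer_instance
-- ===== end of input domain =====

-- B replaces A's linear scan over offsets 1..|b| by closed-form remainder arithmetic (faster in a timing run).


-- ===== PORT A =====
-- the for-loop over range(1, b+1): fuel counts the remaining range elements, x is the current one.
-- When the range is exhausted Python falls off the end (returns None); that is unreachable for b ≠ 0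
-- (the loop always hits a divisible value within |b| steps), so the 0-fuel value 0 is never used under Pre_.
def closestNumberLoop (a b : Int) : Nat → Int → Int
  | 0, _ => 0
  | fuel + 1, x =>
    let x' := if a < 0 then x * (-1) else x
    if PySem.Int.mod (a + x') b = 0 then a + x'
    else if PySem.Int.mod (a - x') b = 0 then a - x'
    else closestNumberLoop a b fuel (x + 1)

def closestNumber (a : Int) (b : Int) : Int :=
  if PySem.Int.mod a b = 0 then a
  else
    let b' := if b < 0 then b * (-1) else b
    closestNumberLoop a b' b'.toNat 1

-- ===== PORT B =====
def closestNumber_alt (a : Int) (b : Int) : Int :=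
  let m := |b|
  let r := PySem.Int.mod a m
  if r = 0 then a
  else if 2 * r < m ∨ (2 * r = m ∧ a < 0) then a - r
  else a + (m - r)

-- ===== PRECONDITION & SPEC =====
-- Pre_ excludes exactly b = 0, where Python A raises ZeroDivisionError (and B raises too).
def Pre_closestNumber (a : Int) (b : Int) : Prop := b ≠ 0
instance (a : Int) (b : Int) : Decidable (Pre_closestNumber a b) := by unfold Pre_closestNumber; infer_instance
def pvWitness_closestNumber : Int × Int := (7, 3)

def Spec_closestNumber (a : Int) (b : Int) (out : Int) : Prop := out = closestNumber_alt a b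
instance (a : Int) (b : Int) (out : Int) : Decidable (Spec_closestNumber a b out) := by unfold Spec_closestNumber; infer_instance

-- ===== CLAIM (what is proved, stated in full; the proofs are below) =====
def Claim_equal_closestNumber : Prop := ∀ (a : Int) (b : Int), Dom_closestNumber a b → Pre_closestNumber a b → Spec_closestNumber a b (closestNumber a b)

-- ===== LEMMAS AND PROOFS =====

-- (a + x) is divisible by m iff x = m - r, for x in [1, m] and r = a % m in (0, m)
lemma hit_plus_iff (a m x r : Int) (hm : 0 < m) (hr : a % m = r) (hr0 : 0 < r) (hrm : r < m)
    (hx1 : 1 ≤ x) (hxm : x ≤ m) : (a + x) % m = 0 ↔ x = m - r := by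
  have ha : a % m + m * (a / m) = a := Int.emod_add_ediv a m
  have ha2 : a = r + m * (a / m) := by omega
  constructor
  · intro h
    have hrw : a + x = (r + x) + m * (a / m) := by omega
    rw [hrw, Int.add_mul_emod_self_left] at h
    obtain ⟨k, hk⟩ := Int.dvd_of_emod_eq_zero h
    have hk0 : 0 < k := by
      by_contra hc
      push_neg at hc
      have : m * k ≤ m * 0 := mul_le_mul_of_nonneg_left hc (le_of_lt hm)
      omega
    have hk2 : k < 2 := by
      by_contra hc
      push_neg at hc
      have : m * 2 ≤ m * k := mul_le_mul_of_nonneg_left hc (le_of_lt hm)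
      omega
    have hk1 : k = 1 := by omega
    rw [hk1, mul_one] at hk
    omega
  · intro h
    rw [h]
    have hrw : a + (m - r) = 0 + m * (a / m + 1) := by rw [mul_add, mul_one]; omega
    rw [hrw, Int.add_mul_emod_self_left]
    exact Int.zero_emod m

-- (a - x) is divisible by m iff x = r, for x in [1, m] and r = a % m in (0, m)
lemma hit_minus_iff (a m x r : Int) (hm : 0 < m) (hr : a % m = r) (hr0 : 0 < r) (hrm : r < m)
    (hx1 : 1 ≤ x) (hxm : x ≤ m) : (a - x) % m = 0 ↔ x = r := by
  have ha : a % m + m * (a / m) = a := Int.emod_add_ediv a m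
  have ha2 : a = r + m * (a / m) := by omega
  constructor
  · intro h
    have hrw : a - x = (r - x) + m * (a / m) := by omega
    rw [hrw, Int.add_mul_emod_self_left] at h
    obtain ⟨k, hk⟩ := Int.dvd_of_emod_eq_zero h
    have hk0 : 0 ≤ k := by
      by_contra hc
      push_neg at hc
      have : m * k ≤ m * (-1) := mul_le_mul_of_nonneg_left (by omega) (le_of_lt hm)
      omega
    have hk2 : k < 1 := by
      by_contra hc
      push_neg at hc
      have : m * 1 ≤ m * k := mul_le_mul_of_nonneg_left hc (le_of_lt hm)
      omega
    have hk1 : k = 0 := by omega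
    rw [hk1, mul_zero] at hk
    omega
  · intro h
    rw [h]
    have hrw : a - r = 0 + m * (a / m) := by omega
    rw [hrw, Int.add_mul_emod_self_left]
    exact Int.zero_emod m

-- the loop, started anywhere at or below the first hit with enough fuel, returns B's closed-form answer
lemma loop_eq (a m r : Int) (hm : 0 < m) (hr : a % m = r) (hr0 : 0 < r) (hrm : r < m) :
    ∀ (fuel : Nat) (x : Int), 1 ≤ x → x ≤ min (m - r) r → min (m - r) r < x + fuel →
      closestNumberLoop a m fuel x =
        (if 2 * r < m ∨ (2 * r = m ∧ a < 0) then a - r else a + (m - r)) := by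
  intro fuel
  induction fuel with
  | zero => intro x h1 h2 h3; omega
  | succ n ih =>
    intro x h1 h2 h3
    have hxm : x ≤ m := by omega
    have hplus := hit_plus_iff a m x r hm hr hr0 hrm h1 hxm
    have hminus := hit_minus_iff a m x r hm hr hr0 hrm h1 hxm
    simp only [closestNumberLoop]
    by_cases hneg : a < 0
    · have e1 : a + (if a < 0 then x * (-1) else x) = a - x := by rw [if_pos hneg]; ring
      have e2 : a - (if a < 0 then x * (-1) else x) = a + x := by rw [if_pos hneg]; ring
      simp only [e1, e2, PySem.Int.mod_eq_emod_of_pos hm, hminus, hplus]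
      by_cases hx_r : x = r
      · have hc : 2 * r < m ∨ (2 * r = m ∧ a < 0) := by omega
        rw [if_pos hx_r, if_pos hc, hx_r]
      · rw [if_neg hx_r]
        by_cases hx_mr : x = m - r
        · have hc : ¬(2 * r < m ∨ (2 * r = m ∧ a < 0)) := by omega
          rw [if_pos hx_mr, if_neg hc, hx_mr]
        · rw [if_neg hx_mr]
          exact ih (x + 1) (by omega) (by omega) (by omega)
    · have e1 : a + (if a < 0 then x * (-1) else x) = a + x := by rw [if_neg hneg]
      have e2 : a - (if a < 0 then x * (-1) else x) = a - x := by rw [if_neg hneg]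
      simp only [e1, e2, PySem.Int.mod_eq_emod_of_pos hm, hminus, hplus]
      by_cases hx_mr : x = m - r
      · have hc : ¬(2 * r < m ∨ (2 * r = m ∧ a < 0)) := by omega
        rw [if_pos hx_mr, if_neg hc, hx_mr]
      · rw [if_neg hx_mr]
        by_cases hx_r : x = r
        · have hc : 2 * r < m ∨ (2 * r = m ∧ a < 0) := by omega
          rw [if_pos hx_r, if_pos hc, hx_r]
        · rw [if_neg hx_r]
          exact ih (x + 1) (by omega) (by omega) (by omega)

-- ===== VERDICT (by name: the statement is the Claim_ definition above) =====
theorem closestNumber_spec : Claim_equal_closestNumber := by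
  intro a b _ hb
  have hm : (0 : Int) < |b| := abs_pos.mpr hb
  have hmodm : PySem.Int.mod a |b| = a % |b| := PySem.Int.mod_eq_emod_of_pos hm
  have hzero : PySem.Int.mod a b = 0 ↔ a % |b| = 0 := by
    rw [PySem.Int.mod_eq_zero_iff_dvd, ← abs_dvd]
    exact ⟨Int.emod_eq_zero_of_dvd, Int.dvd_of_emod_eq_zero⟩
  unfold Spec_closestNumber
  simp only [closestNumber, closestNumber_alt, hmodm]
  by_cases hr : a % |b| = 0
  · rw [if_pos (hzero.mpr hr), if_pos hr]
  · rw [if_neg (fun h => hr (hzero.mp h)), if_neg hr]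
    have hb' : (if b < 0 then b * (-1) else b) = |b| := by
      rcases abs_cases b with ⟨h1, h2⟩ | ⟨h1, h2⟩ <;> split_ifs <;> omega
    rw [hb']
    have hr0 : 0 < a % |b| := lt_of_le_of_ne (Int.emod_nonneg a (ne_of_gt hm)) (Ne.symm hr)
    have hrm : a % |b| < |b| := Int.emod_lt_of_pos a hm
    have hfuel : (((|b|).toNat : Nat) : Int) = |b| := Int.toNat_of_nonneg (le_of_lt hm)
    exact loop_eq a |b| (a % |b|) hm rfl hr0 hrm (|b|).toNat 1 (by omega) (by omega) (by omega)
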